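-- pv_equiv track=rewrite | github.com/walkawayy/Polished-Crystal-Wiki-Scripts | generate_wiki_pages.py | order_base_stat_files_by_dex
-- ===== SOURCE A (Python) =====
-- def order_base_stat_files_by_dex(dex_names: list, asm_files: list):
--     """Reorders the Pokemon base stat files by Pokedex order."""
--     reordered_base_stat_files = []
--
--     for name in dex_names:
--         # Normalize the name for matching.
--         normalized_name = name.lower()
--
--         # Find matching .asm files, including alternate forms.
--         matches = [file for file in asm_files if file.lower().startswith(normalized_name)]
--
--         if matches:
--             reordered_base_stat_files.extend(matches)
--
--         # TODO Remove asm file from list so it's not duplicated.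
--         for match in matches:
--             asm_files.remove(match)
--
--     return reordered_base_stat_files
-- ===== SOURCE B (Python) =====
-- def order_base_stat_files_by_dex(dex_names: list, asm_files: list):
--     """Reorders the Pokemon base stat files by Pokedex order.
--
--     Single pass over the files: each file is assigned to the first dex name
--     (in dex order) whose lowercased name is a prefix of the lowercased file,
--     then the per-name buckets are concatenated.  Like A, files matching no
--     dex name are dropped from the result and left in asm_files.
--     """
--     lowered = [name.lower() for name in dex_names]
--     buckets = [[] for _ in dex_names]
--     leftover = []
--     for file in asm_files:
--         file_lower = file.lower()
--         for i, prefix in enumerate(lowered):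
--             if file_lower.startswith(prefix):
--                 buckets[i].append(file)
--                 break
--         else:
--             leftover.append(file)
--     asm_files[:] = leftover  # same in-place effect as A's removals
--     return [file for bucket in buckets for file in bucket]
-- ===== Notes on version B (the rewrite author's own statement) =====
-- stated objective: alternative
-- what changed: A loops over dex names, repeatedly filtering the file list and removing each match in place; B makes one pass over the files, assigning each file to the first dex name whose lowercased name is a prefix, then concatenates the per-name buckets (no repeated scans or removals of the file list).
import Mathlib
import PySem

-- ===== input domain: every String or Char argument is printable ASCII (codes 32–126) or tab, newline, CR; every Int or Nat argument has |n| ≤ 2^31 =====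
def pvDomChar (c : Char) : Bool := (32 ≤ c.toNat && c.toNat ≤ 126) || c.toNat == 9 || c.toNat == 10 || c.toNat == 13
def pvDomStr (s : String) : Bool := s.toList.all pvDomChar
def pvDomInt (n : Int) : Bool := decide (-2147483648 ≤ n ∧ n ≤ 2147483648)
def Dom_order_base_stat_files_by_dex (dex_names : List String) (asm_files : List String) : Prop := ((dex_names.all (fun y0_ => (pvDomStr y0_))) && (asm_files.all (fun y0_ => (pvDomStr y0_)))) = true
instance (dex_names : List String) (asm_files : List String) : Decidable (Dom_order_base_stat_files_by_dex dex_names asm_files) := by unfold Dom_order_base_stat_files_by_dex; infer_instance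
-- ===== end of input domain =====

-- B replaces A's per-dex-name filter/remove passes by one pass over the files that assigns
-- each file to its first matching dex name and concatenates the buckets (objective: alternative).
-- Python A mutates asm_files in place (it removes the matched files); Python B leaves the same
-- leftover in asm_files via slice assignment; the equivalence proved here is about the RETURN value.

-- ===== PORT A =====
-- A's loop over dex_names: filter the matching files, extend the result, remove them one by one.
def pvAGo (dex_names : List String) (asm : List String) (acc : List String) : List String :=
  match dex_names with
  | [] => acc
  | name :: rest =>
    let normalized_name := PySem.Str.lower name
    let matched := asm.filter (fun file => PySem.Str.startswith (PySem.Str.lower file) normalized_name)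
    let acc' := if matched.isEmpty then acc else acc ++ matched
    -- asm_files.remove(match); the element is always present, so remove? is never none
    let asm' := matched.foldl (fun l m => (PySem.List.remove? l m).getD l) asm
    pvAGo rest asm' acc'

def order_base_stat_files_by_dex (dex_names : List String) (asm_files : List String) : List String :=
  pvAGo dex_names asm_files []

-- ===== PORT B =====
-- the inner 'for i, prefix in enumerate(lowered): if …: break' loop: index of the first matching prefix
def pvFirstIdx (lowered : List String) (file_lower : String) : Option Nat :=
  match lowered with
  | [] => none
  | p :: rest =>
    if PySem.Str.startswith file_lower p then some 0
    else (pvFirstIdx rest file_lower).map (· + 1)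

-- buckets[i].append(file)
def pvAppendAt (buckets : List (List String)) (i : Nat) (file : String) : List (List String) :=
  buckets.set i (buckets.getD i [] ++ [file])

def order_base_stat_files_by_dex_alt (dex_names : List String) (asm_files : List String) : List String :=
  let lowered := dex_names.map PySem.Str.lower
  let buckets := asm_files.foldl
    (fun bk file =>
      match pvFirstIdx lowered (PySem.Str.lower file) with
      | some i => pvAppendAt bk i file
      | none => bk)
    (dex_names.map (fun _ => ([] : List String)))
  buckets.flatten

-- ===== PRECONDITION & SPEC =====
def Spec_order_base_stat_files_by_dex (dex_names : List String) (asm_files : List String) (out : List String) : Prop := out = order_base_stat_files_by_dex_alt dex_names asm_files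
instance (dex_names : List String) (asm_files : List String) (out : List String) : Decidable (Spec_order_base_stat_files_by_dex dex_names asm_files out) := by unfold Spec_order_base_stat_files_by_dex; infer_instance

-- ===== CLAIM (what is proved, stated in full; the proofs are below) =====
def Claim_equal_order_base_stat_files_by_dex : Prop := ∀ (dex_names : List String) (asm_files : List String), Dom_order_base_stat_files_by_dex dex_names asm_files → Spec_order_base_stat_files_by_dex dex_names asm_files (order_base_stat_files_by_dex dex_names asm_files)

-- ===== LEMMAS AND PROOFS =====

-- prefix test against an already-lowered name
def pvSw (n file : String) : Bool := PySem.Str.startswith (PySem.Str.lower file) n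

-- the sequential "filter, then remove the matches" view of A, over the lowered names
def pvClean (lowered : List String) (asm : List String) : List String :=
  match lowered with
  | [] => []
  | n :: rest => asm.filter (pvSw n) ++ pvClean rest (asm.filter (fun f => !(pvSw n f)))

lemma pvRemoveFold_cons (ms : List String) (l : List String) (x : String)
    (h : ∀ m ∈ ms, x ≠ m) :
    ms.foldl (fun l m => (PySem.List.remove? l m).getD l) (x :: l)
      = x :: ms.foldl (fun l m => (PySem.List.remove? l m).getD l) l := by
  induction ms generalizing l with
  | nil => rfl
  | cons m ms ih =>
    simp only [List.foldl_cons]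
    rw [PySem.List.remove?_cons_of_ne l (h m (by simp))]
    cases hr : PySem.List.remove? l m with
    | none => simp only [Option.map_none, Option.getD_none]
              exact ih l (fun m hm => h m (by simp [hm]))
    | some l' => simp only [Option.map_some, Option.getD_some]
                 exact ih l' (fun m hm => h m (by simp [hm]))

lemma pvRemoveAll (p : String → Bool) (asm : List String) :
    (asm.filter p).foldl (fun l m => (PySem.List.remove? l m).getD l) asm
      = asm.filter (fun x => !p x) := by
  induction asm with
  | nil => rfl
  | cons x xs ih =>
    by_cases hp : p x = true
    · rw [List.filter_cons_of_pos hp, List.filter_cons_of_neg (by simp [hp])]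
      simp only [List.foldl_cons, PySem.List.remove?_cons_self, Option.getD_some]
      exact ih
    · rw [List.filter_cons_of_neg hp, List.filter_cons_of_pos (by simp [hp])]
      rw [pvRemoveFold_cons _ _ _ (by
        intro m hm he
        subst he
        exact hp (List.of_mem_filter hm))]
      rw [ih]

lemma pvAGo_eq_clean (dex_names : List String) (asm acc : List String) :
    pvAGo dex_names asm acc = acc ++ pvClean (dex_names.map PySem.Str.lower) asm := by
  induction dex_names generalizing asm acc with
  | nil => simp [pvAGo, pvClean]
  | cons name rest ih =>
    simp only [pvAGo]
    rw [pvRemoveAll, ih]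
    simp only [List.map_cons, pvClean, pvSw]
    have hfe : List.filter (pvSw (PySem.Str.lower name)) asm
        = asm.filter (fun file => PySem.Str.startswith (PySem.Str.lower file) (PySem.Str.lower name)) := rfl
    by_cases he : (asm.filter fun file => PySem.Str.startswith (PySem.Str.lower file) (PySem.Str.lower name)).isEmpty
    · rw [if_pos he, hfe, List.isEmpty_iff.mp he]
      simp
    · rw [if_neg he, hfe, List.append_assoc]

lemma pvFirstIdx_lt (ls : List String) (fl : String) (i : Nat)
    (h : pvFirstIdx ls fl = some i) : i < ls.length := by
  induction ls generalizing i with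
  | nil => simp [pvFirstIdx] at h
  | cons p rest ih =>
    simp only [pvFirstIdx] at h
    split at h
    · simp only [Option.some.injEq] at h
      simp only [List.length_cons]
      omega
    · cases hr : pvFirstIdx rest fl with
      | none => rw [hr] at h; simp at h
      | some k =>
        rw [hr] at h
        simp only [Option.map_some, Option.some.injEq] at h
        have := ih k hr
        simp only [List.length_cons]
        omega

lemma pvClean_eq_flatten (ls : List String) (asm : List String) :
    pvClean ls asm
      = ((List.range ls.length).map
          (fun j => asm.filter (fun f => pvFirstIdx ls (PySem.Str.lower f) == some j))).flatten := by
  induction ls generalizing asm with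
  | nil => simp [pvClean]
  | cons n rest ih =>
    simp only [pvClean, List.length_cons, List.range_succ_eq_map, List.map_cons, List.map_map,
      List.flatten_cons]
    congr 1
    · apply List.filter_congr
      intro f _
      by_cases hs : PySem.Chars.startswith (PySem.Chars.lower f.toList) n.toList = true
      · simp [pvSw, pvFirstIdx, hs]
      · cases hr : pvFirstIdx rest (PySem.Str.lower f) <;>
          simp [pvSw, pvFirstIdx, hs, hr]
    · rw [ih]
      congr 1
      apply List.map_congr_left
      intro j _
      rw [List.filter_filter]
      apply List.filter_congr
      intro f _
      by_cases hs : PySem.Chars.startswith (PySem.Chars.lower f.toList) n.toList = true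
      · simp [pvSw, pvFirstIdx, hs]
      · cases hr : pvFirstIdx rest (PySem.Str.lower f) with
        | none => simp [pvSw, pvFirstIdx, hs, hr]
        | some k => by_cases hk : k = j <;> simp [pvSw, pvFirstIdx, hs, hr, hk]

lemma pvMapRangeGetD (l : List (List String)) :
    (List.range l.length).map (fun j => l.getD j []) = l := by
  apply List.ext_getElem
  · simp
  · intro k h1 h2
    simp [List.getD, List.getElem?_eq_getElem h2]

lemma pvBucketFold (ls : List String) (asm : List String) (bk : List (List String))
    (hlen : bk.length = ls.length) :
    asm.foldl
        (fun bk file =>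
          match pvFirstIdx ls (PySem.Str.lower file) with
          | some i => pvAppendAt bk i file
          | none => bk) bk
      = (List.range bk.length).map
          (fun j => bk.getD j [] ++ asm.filter (fun f => pvFirstIdx ls (PySem.Str.lower f) == some j)) := by
  induction asm generalizing bk with
  | nil =>
    simp only [List.foldl_nil, List.filter_nil, List.append_nil]
    exact (pvMapRangeGetD bk).symm
  | cons f asm ih =>
    simp only [List.foldl_cons]
    cases hf : pvFirstIdx ls (PySem.Str.lower f) with
    | none =>
      rw [ih bk hlen]
      apply List.map_congr_left
      intro j _
      rw [List.filter_cons_of_neg (by simp [hf])]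
    | some i =>
      have hi : i < bk.length := hlen ▸ pvFirstIdx_lt ls _ i hf
      rw [ih (pvAppendAt bk i f) (by simp [pvAppendAt, hlen])]
      rw [show (pvAppendAt bk i f).length = bk.length by simp [pvAppendAt]]
      apply List.map_congr_left
      intro j hj
      by_cases hji : j = i
      · subst hji
        rw [List.filter_cons_of_pos (by simp [hf])]
        simp only [pvAppendAt, List.getD, List.getElem?_set_self hi]
        simp
      · rw [List.filter_cons_of_neg (by simp [hf, Ne.symm hji])]
        simp only [pvAppendAt, List.getD, List.getElem?_set_ne (Ne.symm hji)]

-- ===== VERDICT (by name: the statement is the Claim_ definition above) =====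
theorem order_base_stat_files_by_dex_spec : Claim_equal_order_base_stat_files_by_dex := by
  intro dex_names asm_files _
  unfold Spec_order_base_stat_files_by_dex
  have halt : order_base_stat_files_by_dex_alt dex_names asm_files
      = (asm_files.foldl
          (fun bk file =>
            match pvFirstIdx (dex_names.map PySem.Str.lower) (PySem.Str.lower file) with
            | some i => pvAppendAt bk i file
            | none => bk)
          (dex_names.map (fun _ => ([] : List String)))).flatten := rfl
  unfold order_base_stat_files_by_dex
  rw [pvAGo_eq_clean, List.nil_append, pvClean_eq_flatten, halt,
    pvBucketFold _ _ _ (by simp)]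
  simp only [List.length_map]
  congr 1
  apply List.map_congr_left
  intro j _
  rw [List.getD, List.getElem?_map]
  cases dex_names[j]? <;> simp
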